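-- pv_equiv track=rewrite | github.com/jacquesw12/Advent-of-code-2020 | day6/day6.py | answers_everyone
-- ===== SOURCE A (Python) =====
-- def answers_everyone(file):
--     list_sets = []
--     res_set = set()
--     next_entry = False
--
--     for line in file:
--         if line.strip() and not next_entry:
--             next_entry = True
--             letters = [c for c in line.strip()]
--             if len(letters) > 1:
--                 res_set.update(letters)
--             else:
--                 res_set.add(letters[0])
--         elif line.strip():
--             cur_set = set()
--             letters = [c for c in line.strip()]
--             if len(letters) > 1:
--                 cur_set.update(letters)
--             else:
--                 cur_set.add(letters[0])
--             res_set = res_set.intersection(cur_set)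
--         else:
--             list_sets.append(res_set)
--             res_set = set()
--             next_entry = False
--     list_sets.append(res_set)
--     return list_sets
-- ===== SOURCE B (Python) =====
-- def answers_everyone(file):
--     # First pass: split lines into groups of per-line character sets (blank line starts a new group).
--     groups = [[]]
--     for line in file:
--         s = line.strip()
--         if s:
--             groups[-1].append(set(s))
--         else:
--             groups.append([])
--     # Second pass: intersect each group (empty group -> empty set).
--     return [set.intersection(*g) if g else set() for g in groups]
-- ===== Notes on version B (the rewrite author's own statement) =====
-- stated objective: simpler
-- what changed: Replaces the interleaved first-vs-subsequent-line accumulation with a boolean flag by a two-pass grouping-then-mapping: first split lines into groups at blanks, then map set.intersection over each group.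
import Mathlib
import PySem

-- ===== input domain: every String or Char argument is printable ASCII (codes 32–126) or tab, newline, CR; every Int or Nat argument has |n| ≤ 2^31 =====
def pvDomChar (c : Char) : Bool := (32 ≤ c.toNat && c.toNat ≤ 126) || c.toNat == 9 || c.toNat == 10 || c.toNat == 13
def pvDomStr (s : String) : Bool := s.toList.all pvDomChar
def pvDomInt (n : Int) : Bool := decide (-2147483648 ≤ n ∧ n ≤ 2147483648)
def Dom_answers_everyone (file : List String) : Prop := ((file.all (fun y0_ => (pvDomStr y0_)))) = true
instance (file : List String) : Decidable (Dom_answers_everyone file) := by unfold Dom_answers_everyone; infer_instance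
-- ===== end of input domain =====

-- ===== PORT A =====
-- B changes only the decomposition (group lines at blanks, then map intersection over each group); same cost.
-- letters[0]: the guard 'stripped ≠ ""' makes letters non-empty, so Python's letters[0] is letters.headI (never raises).
def pyLetters (s : String) : List String := s.toList.map (fun c => String.ofList [c])

def aStep (st : List (List String) × List String × Bool) (line : String) :
    List (List String) × List String × Bool :=
  let stripped := PySem.Str.strip line
  if stripped ≠ "" ∧ st.2.2 = false then
    let letters := pyLetters stripped
    (st.1,
      (if letters.length > 1 then PySem.Set.update st.2.1 letters
       else PySem.Set.add st.2.1 letters.headI), true)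
  else if stripped ≠ "" then
    let letters := pyLetters stripped
    let cur_set :=
      if letters.length > 1 then PySem.Set.update PySem.Set.empty letters
      else PySem.Set.add PySem.Set.empty letters.headI
    (st.1, PySem.Set.inter st.2.1 cur_set, st.2.2)
  else
    (st.1 ++ [st.2.1], PySem.Set.empty, false)

def answers_everyone (file : List String) : List (List String) :=
  let st := file.foldl aStep ([], PySem.Set.empty, false)
  st.1 ++ [st.2.1]

-- ===== PORT B =====
-- set.intersection(*g) for non-empty g is a left fold of & over g
def interAll (g : List (List String)) : List String :=
  match g with
  | [] => PySem.Set.empty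
  | h :: t => t.foldl PySem.Set.inter h

def bStep (groups : List (List (List String))) (line : String) : List (List (List String)) :=
  let s := PySem.Str.strip line
  if s = "" then groups ++ [[]]
  else groups.dropLast ++ [groups.getLast! ++ [PySem.Set.ofList (pyLetters s)]]

def answers_everyone_alt (file : List String) : List (List String) :=
  (file.foldl bStep [[]]).map interAll

-- ===== PRECONDITION & SPEC =====
def Spec_answers_everyone (file : List String) (out : List (List String)) : Prop := out = answers_everyone_alt file
instance (file : List String) (out : List (List String)) : Decidable (Spec_answers_everyone file out) := by unfold Spec_answers_everyone; infer_instance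

-- ===== CLAIM (what is proved, stated in full; the proofs are below) =====
def Claim_equal_answers_everyone : Prop := ∀ (file : List String), Dom_answers_everyone file → Spec_answers_everyone file (answers_everyone file)

-- ===== LEMMAS AND PROOFS =====

-- A's length-1-vs-longer branching from the empty set is set(letters)
theorem mkset_eq_ofList (letters : List String) (h : letters ≠ []) :
    (if letters.length > 1 then PySem.Set.update PySem.Set.empty letters
     else PySem.Set.add PySem.Set.empty letters.headI) = PySem.Set.ofList letters := by
  match letters with
  | [x] => simp [PySem.Set.ofList_eq_foldl, PySem.Set.empty]
  | x :: y :: t => simp [PySem.Set.update, PySem.Set.ofList_eq_foldl, PySem.Set.empty]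
  | [] => exact absurd rfl h

theorem interAll_concat (g : List (List String)) (x : List String) (h : g ≠ []) :
    interAll (g ++ [x]) = PySem.Set.inter (interAll g) x := by
  match g with
  | a :: t => simp [interAll]
  | [] => exact absurd rfl h

theorem pyLetters_ne_nil (s : String) (h : s ≠ "") : pyLetters s ≠ [] := by
  intro hc
  simp only [pyLetters, List.map_eq_nil_iff] at hc
  exact h (by cases s; simp_all)

-- mapping interAll over a non-empty list, last element split off
theorem map_split_last (l : List (List (List String))) (h : l ≠ []) :
    l.dropLast.map interAll ++ [interAll (l.getLast?.getD default)] = l.map interAll := by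
  induction l with
  | nil => exact absurd rfl h
  | cons a t ih =>
    cases t with
    | nil => simp
    | cons b u =>
      simp only [List.dropLast_cons₂, List.map_cons, List.getLast?_cons_cons, List.cons_append]
      rw [ih (by simp)]
      simp

-- the main loop invariant: A's state is determined by B's groups (closed groups ++ current group)
theorem loop_inv (file : List String) (g0 : List (List (List String))) (cur : List (List String)) :
    file.foldl aStep (g0.map interAll, interAll cur, decide (cur ≠ [])) =
      ((file.foldl bStep (g0 ++ [cur])).dropLast.map interAll,
        interAll (file.foldl bStep (g0 ++ [cur])).getLast!,
        decide ((file.foldl bStep (g0 ++ [cur])).getLast! ≠ [])) := by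
  induction file generalizing g0 cur with
  | nil => simp
  | cons line rest ih =>
    simp only [List.foldl_cons]
    by_cases hb : PySem.Str.strip line = ""
    · -- blank line: A flushes, B opens a new group
      have ha : aStep (g0.map interAll, interAll cur, decide (cur ≠ [])) line
          = ((g0 ++ [cur]).map interAll, interAll ([] : List (List String)),
             decide (([] : List (List String)) ≠ [])) := by
        simp [aStep, hb, interAll, PySem.Set.empty]
      have hbs : bStep (g0 ++ [cur]) line = (g0 ++ [cur]) ++ [[]] := by
        simp [bStep, hb]
      rw [ha, ih (g0 ++ [cur]) []]
      simp only [hbs]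
    · -- non-blank line
      have hl : pyLetters (PySem.Str.strip line) ≠ [] := pyLetters_ne_nil _ hb
      cases cur with
      | nil =>
        have ha : aStep (g0.map interAll, interAll ([] : List (List String)), decide (([] : List (List String)) ≠ [])) line
            = (g0.map interAll,
               interAll [PySem.Set.ofList (pyLetters (PySem.Str.strip line))],
               decide ([PySem.Set.ofList (pyLetters (PySem.Str.strip line))] ≠ ([] : List (List String)))) := by
          rw [← mkset_eq_ofList _ hl]
          simp [aStep, hb, interAll, PySem.Set.empty]
        have hbs : bStep (g0 ++ [[]]) line
            = g0 ++ [[PySem.Set.ofList (pyLetters (PySem.Str.strip line))]] := by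
          simp [bStep, hb]
        rw [ha, ih g0 [PySem.Set.ofList (pyLetters (PySem.Str.strip line))]]
        simp only [hbs]
      | cons h t =>
        have ha : aStep (g0.map interAll, interAll (h :: t), decide ((h :: t) ≠ ([] : List (List String)))) line
            = (g0.map interAll,
               interAll ((h :: t) ++ [PySem.Set.ofList (pyLetters (PySem.Str.strip line))]),
               decide (((h :: t) ++ [PySem.Set.ofList (pyLetters (PySem.Str.strip line))]) ≠ ([] : List (List String)))) := by
          rw [interAll_concat _ _ (by simp), ← mkset_eq_ofList _ hl]
          simp [aStep, hb]
        have hbs : bStep (g0 ++ [h :: t]) line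
            = g0 ++ [(h :: t) ++ [PySem.Set.ofList (pyLetters (PySem.Str.strip line))]] := by
          simp [bStep, hb]
        rw [ha, ih g0 ((h :: t) ++ [PySem.Set.ofList (pyLetters (PySem.Str.strip line))])]
        simp only [hbs]

theorem bfold_ne_nil (file : List String) (gs : List (List (List String))) (h : gs ≠ []) :
    file.foldl bStep gs ≠ [] := by
  induction file generalizing gs with
  | nil => simpa
  | cons line rest ih =>
    simp only [List.foldl_cons]
    apply ih
    by_cases hb : PySem.Str.strip line = "" <;> simp [bStep, hb]

-- ===== VERDICT =====
theorem answers_everyone_spec : Claim_equal_answers_everyone := by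
  intro file _
  unfold Spec_answers_everyone answers_everyone answers_everyone_alt
  show (file.foldl aStep ([], PySem.Set.empty, false)).1 ++ [(file.foldl aStep ([], PySem.Set.empty, false)).2.1] = _
  rw [show (([] : List (List String)), PySem.Set.empty, false)
      = (([] : List (List (List String))).map interAll, interAll ([] : List (List String)),
         decide (([] : List (List String)) ≠ [])) from by simp [interAll, PySem.Set.empty]]
  rw [loop_inv file [] []]
  simp only [List.nil_append, List.getLast!_eq_getLast?_getD]
  exact map_split_last _ (bfold_ne_nil file [[]] (by simp))
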